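-- pv_equiv track=rewrite | github.com/anuar2k/ASD-2020 | 07/02off.py | DFSRaw
-- ===== SOURCE A (Python) =====
-- class VertexRaw:
--     def __init__(self):
--         self.visited = False
--         self.parent = None
--
-- def DFSVisitRaw(G, vertices, u):
--     vertices[u].visited = True
--
--     for v in G[u]:
--         if not vertices[v].visited:
--             vertices[v].parent = u
--             DFSVisitRaw(G, vertices, v)
--
-- def DFSRaw(G):
--     n = len(G)
--     vertices = []
--     for _ in range(n):
--         vertices.append(VertexRaw())
--
--     for v in range(n):
--         if not vertices[v].visited:
--             DFSVisitRaw(G, vertices, v)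
--
--     result = []
--     for vertex in vertices:
--         result.append(vertex.parent)
--     return result
-- ===== SOURCE B (Python) =====
-- def DFSRaw(G):
--     n = len(G)
--     visited = [False] * n
--     parent = [None] * n
--     for s in range(n):
--         if visited[s]:
--             continue
--         visited[s] = True
--         stack = [(s, iter(G[s]))]
--         while stack:
--             u, it = stack[-1]
--             for v in it:
--                 if not visited[v]:
--                     parent[v] = u
--                     visited[v] = True
--                     stack.append((v, iter(G[v])))
--                     break
--             else:
--                 stack.pop()
--     return parent
-- ===== Notes on version B (the rewrite author's own statement) =====
-- stated objective: alternative
-- what changed: recursive DFS over a list of mutable VertexRaw objects is replaced by an iterative DFS with an explicit stack of (vertex, neighbor-iterator) frames over plain visited/parent lists, preserving the exact discovery order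
import Mathlib
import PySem

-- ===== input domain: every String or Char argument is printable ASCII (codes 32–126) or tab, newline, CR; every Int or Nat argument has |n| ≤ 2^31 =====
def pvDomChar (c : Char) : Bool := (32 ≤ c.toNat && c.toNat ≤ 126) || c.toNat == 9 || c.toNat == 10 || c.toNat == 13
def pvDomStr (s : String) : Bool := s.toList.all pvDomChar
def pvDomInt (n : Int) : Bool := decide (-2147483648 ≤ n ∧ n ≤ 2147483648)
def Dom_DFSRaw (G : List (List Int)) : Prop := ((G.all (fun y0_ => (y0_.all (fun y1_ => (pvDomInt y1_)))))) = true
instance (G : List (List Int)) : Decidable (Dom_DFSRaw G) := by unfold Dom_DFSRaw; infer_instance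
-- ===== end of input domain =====

-- B replaces A's recursive DFS (vertex objects) by an iterative DFS with an explicit stack of
-- (vertex, remaining-neighbors) frames over plain visited/parent lists — same discovery order,
-- same O(V+E) cost; objective: alternative (no recursion). Return value only; neither mutates G.

-- Python list index: for -n ≤ v < n, G[v] is G[v mod n] (negative wraps); out of that range Python
-- raises IndexError — excluded by Pre_DFSRaw, so the branch taken outside it is never claimed.
def pvWrap (n : Nat) (v : Int) : Nat := (if v < 0 then v + n else v).toNat

-- ===== PORT A =====
-- vertices[u] : VertexRaw {visited, parent} is ported as a pair (Bool × Option Int).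
-- The recursion of DFSVisitRaw is made total by a fuel counter; the Python recursion depth is at
-- most |G| on inputs in Pre_, and the ports are only claimed there, where fuel |G| never runs out.
def DFSVisitRaw (G : List (List Int)) : Nat → List (Bool × Option Int) → Int → List (Bool × Option Int)
  | 0, vertices, _ => vertices
  | fuel+1, vertices, u =>
    -- vertices[u].visited = True   (u is the raw Python label, possibly negative: wrap to index)
    let vertices := vertices.set (pvWrap G.length u)
      (true, (vertices.getD (pvWrap G.length u) (false, none)).2)
    -- for v in G[u]: if not vertices[v].visited: vertices[v].parent = u; DFSVisitRaw(G, vertices, v)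
    (G.getD (pvWrap G.length u) []).foldl (fun vs v =>
      let w := pvWrap G.length v
      if (vs.getD w (false, none)).1 then vs
      else DFSVisitRaw G fuel (vs.set w ((vs.getD w (false, none)).1, some u)) v) vertices

def DFSRaw (G : List (List Int)) : List (Option Int) :=
  let n := G.length
  -- vertices = [VertexRaw() for _ in range(n)]
  let vertices := List.replicate n ((false : Bool), (none : Option Int))
  -- for v in range(n): if not vertices[v].visited: DFSVisitRaw(G, vertices, v)
  let vertices := (List.range n).foldl (fun vs v =>
      if (vs.getD v (false, none)).1 then vs else DFSVisitRaw G n vs (v : Int)) vertices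
  -- result = [vertex.parent for vertex in vertices]
  vertices.map (·.2)

-- ===== PORT B =====
-- The while-stack loop of Source B; each iteration of Python's inner `for v in it` is one step here
-- (a frame stores the not-yet-consumed part of the neighbor list, exactly what iter(G[u]) holds).
-- Fuel only makes the loop total; the loop does at most 2·Σ(|G[i]|+1) steps on inputs in Pre_.
def pvRunB (G : List (List Int)) :
    Nat → List Bool × List (Option Int) → List (Int × List Int) → List Bool × List (Option Int)
  | 0, st, _ => st
  | fuel+1, st, stack =>
    match stack with
    | [] => st
    | (_, []) :: rest => pvRunB G fuel st rest                      -- iterator exhausted: stack.pop()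
    | (u, v :: vs) :: rest =>
      let w := pvWrap G.length v
      if st.1.getD w false then pvRunB G fuel st ((u, vs) :: rest)  -- already visited: next neighbor
      else                                                          -- discover w from u and descend
        pvRunB G fuel (st.1.set w true, st.2.set w (some u))
          ((v, G.getD w []) :: (u, vs) :: rest)

def DFSRaw_alt (G : List (List Int)) : List (Option Int) :=
  let n := G.length
  let fuel := 2 * ((G.map (fun l => l.length + 1)).sum) + 1
  let init := (List.replicate n false, List.replicate n (none : Option Int))
  let res := (List.range n).foldl (fun (st : List Bool × List (Option Int)) s =>
      if st.1.getD s false then st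
      else pvRunB G fuel (st.1.set s true, st.2) [((s : Int), G.getD s [])]) init
  res.2

-- ===== PRECONDITION & SPEC =====
-- Pre_ excludes exactly the graphs with a neighbor index outside [-n, n): there Python A (and B
-- alike) raises IndexError, so A returns no value.
def Pre_DFSRaw (G : List (List Int)) : Prop :=
  ∀ l ∈ G, ∀ v ∈ l, -(G.length : Int) ≤ v ∧ v < (G.length : Int)
instance (G : List (List Int)) : Decidable (Pre_DFSRaw G) := by unfold Pre_DFSRaw; infer_instance

def pvWitness_DFSRaw : List (List Int) := [[1, -2], [0], [1, 0]]

def Spec_DFSRaw (G : List (List Int)) (out : List (Option Int)) : Prop := out = DFSRaw_alt G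
instance (G : List (List Int)) (out : List (Option Int)) : Decidable (Spec_DFSRaw G out) := by
  unfold Spec_DFSRaw; infer_instance

-- ===== CLAIM (what is proved, stated in full; the proofs are below) =====
def Claim_equal_DFSRaw : Prop :=
  ∀ (G : List (List Int)), Dom_DFSRaw G → Pre_DFSRaw G → Spec_DFSRaw G (DFSRaw G)

-- ===== LEMMAS AND PROOFS =====

-- number of unvisited vertices
def nvis (st : List (Bool × Option Int)) : Nat := st.countP (fun p => !p.1)

-- the continuation of DFSVisitRaw after marking u, on the remaining neighbor list vs
def finishA (G : List (List Int)) (f : Nat) (st : List (Bool × Option Int)) (u : Int)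
    (vs : List Int) : List (Bool × Option Int) :=
  vs.foldl (fun vs_ v =>
      let w := pvWrap G.length v
      if (vs_.getD w (false, none)).1 then vs_
      else DFSVisitRaw G f (vs_.set w ((vs_.getD w (false, none)).1, some u)) v) st

-- pair-state version of pvRunB (A's state shape), the object of the bridge lemma
def runP (G : List (List Int)) :
    Nat → List (Bool × Option Int) → List (Int × List Int) → List (Bool × Option Int)
  | 0, st, _ => st
  | fuel+1, st, stack =>
    match stack with
    | [] => st
    | (_, []) :: rest => runP G fuel st rest
    | (u, v :: vs) :: rest =>
      let w := pvWrap G.length v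
      if (st.getD w (false, none)).1 then runP G fuel st ((u, vs) :: rest)
      else runP G fuel (st.set w (true, some u)) ((v, G.getD w []) :: (u, vs) :: rest)


-- -------- generic helpers --------

theorem pvWrap_lt (n : Nat) (v : Int) (h1 : -(n : Int) ≤ v) (h2 : v < (n : Int)) :
    pvWrap n v < n := by
  unfold pvWrap; split_ifs with h <;> omega

theorem pv_foldl_inv {α σ : Type} (P : σ → Prop) (f : σ → α → σ) :
    ∀ (l : List α) (s : σ), P s → (∀ s a, a ∈ l → P s → P (f s a)) → P (l.foldl f s) := by
  intro l
  induction l with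
  | nil => intro s h _; exact h
  | cons a l ih =>
    intro s h hs
    exact ih (f s a) (hs s a (by simp) h) (fun s b hb hP => hs s b (by simp [hb]) hP)

theorem pv_foldl_rel {α σ τ : Type} (R : σ → τ → Prop) (f : σ → α → σ) (g : τ → α → τ) :
    ∀ (l : List α) (s : σ) (t : τ), R s t →
      (∀ s t a, a ∈ l → R s t → R (f s a) (g t a)) → R (l.foldl f s) (l.foldl g t) := by
  intro l
  induction l with
  | nil => intro s t h _; exact h
  | cons a l ih =>
    intro s t h hs
    exact ih (f s a) (g t a) (hs s t a (by simp) h)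
      (fun s t b hb hR => hs s t b (by simp [hb]) hR)

theorem pv_getD_map_fst (st : List (Bool × Option Int)) (i : Nat) :
    (st.map (fun p => p.1)).getD i false = (st.getD i (false, none)).1 := by
  rw [List.getD_eq_getElem?_getD, List.getD_eq_getElem?_getD, List.getElem?_map]
  cases st[i]? <;> rfl

theorem pv_getD_map_snd (st : List (Bool × Option Int)) (i : Nat) :
    (st.map (fun p => p.2)).getD i none = (st.getD i (false, none)).2 := by
  rw [List.getD_eq_getElem?_getD, List.getD_eq_getElem?_getD, List.getElem?_map]
  cases st[i]? <;> rfl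

theorem pv_set_getD_self {α : Type} (l : List α) (i : Nat) (d : α) (h : i < l.length) :
    l.set i (l.getD i d) = l := by
  rw [List.getD_eq_getElem l d h]
  exact List.set_getElem_self h

theorem pv_countP_set {α : Type} (p : α → Bool) :
    ∀ (l : List α) (i : Nat) (a : α), i < l.length →
      (l.set i a).countP p + (if p (l.getD i a) then 1 else 0)
        = l.countP p + (if p a then 1 else 0) := by
  intro l
  induction l with
  | nil => intro i a h; simp at h
  | cons x l ih =>
    intro i a h
    cases i with
    | zero => simp [List.countP_cons]; split_ifs <;> omega
    | succ i =>
      have h' : i < l.length := by simpa using h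
      have := ih i a h'
      simp only [List.set_cons_succ, List.countP_cons, List.getD_cons_succ]
      split_ifs at this ⊢ <;> omega

-- -------- nvis facts --------

theorem nvis_le_length (st : List (Bool × Option Int)) : nvis st ≤ st.length :=
  List.countP_le_length

theorem nvis_pos (st : List (Bool × Option Int)) (i : Nat) (h : i < st.length)
    (hv : (st.getD i (false, none)).1 = false) : 1 ≤ nvis st := by
  rw [List.getD_eq_getElem st _ h] at hv
  have : 0 < st.countP (fun p => !p.1) :=
    List.countP_pos_iff.mpr ⟨st[i], List.getElem_mem h, by simp [hv]⟩
  unfold nvis; omega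

theorem nvis_set (st : List (Bool × Option Int)) (i : Nat) (x : Bool × Option Int)
    (h : i < st.length) :
    nvis (st.set i x) + (if (st[i]).1 then 0 else 1) = nvis st + (if x.1 then 0 else 1) := by
  have hc := pv_countP_set (fun p => !p.1) st i x h
  rw [List.getD_eq_getElem st x h] at hc
  unfold nvis
  cases hb : (st[i]).1 <;> cases hx : x.1 <;> simp [hb, hx] at hc ⊢ <;> omega

theorem nvis_set_true (st : List (Bool × Option Int)) (i : Nat) (x : Option Int)
    (h : i < st.length) (hv : (st.getD i (false, none)).1 = false) :
    nvis (st.set i (true, x)) + 1 = nvis st := by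
  have := nvis_set st i (true, x) h
  rw [List.getD_eq_getElem st _ h] at hv
  simp [hv] at this
  omega

theorem pv_if_pair (b : Bool) (y : Option Int) (m k : Nat) :
    (if ((b, y) : Bool × Option Int).1 = true then m else k) = if b = true then m else k := rfl

theorem nvis_mark_le (st : List (Bool × Option Int)) (u : Nat) :
    nvis (st.set u (true, (st.getD u (false, none)).2)) ≤ nvis st := by
  by_cases h : u < st.length
  · have h2 := nvis_set st u (true, (st.getD u (false, none)).2) h
    rw [pv_if_pair, if_pos (rfl : (true : Bool) = true)] at h2
    by_cases hb : (st[u]).1 = true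
    · rw [if_pos hb] at h2; omega
    · rw [if_neg hb] at h2; omega
  · rw [List.set_eq_of_length_le (Nat.le_of_not_lt h)]

theorem nvis_setPar (s : List (Bool × Option Int)) (w : Nat) (u : Int) :
    nvis (s.set w ((s.getD w (false, none)).1, some u)) = nvis s := by
  by_cases h : w < s.length
  · rw [List.getD_eq_getElem s (false, none) h]
    have h2 := nvis_set s w ((s[w]).1, some u) h
    rw [pv_if_pair] at h2
    by_cases hb : (s[w]).1 = true
    · rw [if_pos hb] at h2; omega
    · rw [if_neg hb] at h2; omega
  · rw [List.set_eq_of_length_le (Nat.le_of_not_lt h)]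

-- -------- unfolding equations --------

theorem visit_succ (G : List (List Int)) (f : Nat) (st : List (Bool × Option Int)) (u : Int) :
    DFSVisitRaw G (f+1) st u
      = finishA G f
          (st.set (pvWrap G.length u) (true, (st.getD (pvWrap G.length u) (false, none)).2))
          u (G.getD (pvWrap G.length u) []) := rfl

theorem finishA_nil (G : List (List Int)) (f : Nat) (st : List (Bool × Option Int)) (u : Int) :
    finishA G f st u [] = st := rfl

theorem finishA_cons (G : List (List Int)) (f : Nat) (st : List (Bool × Option Int)) (u : Int)
    (v : Int) (vs : List Int) :
    finishA G f st u (v :: vs)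
      = finishA G f
          (if (st.getD (pvWrap G.length v) (false, none)).1 then st
           else DFSVisitRaw G f
             (st.set (pvWrap G.length v) ((st.getD (pvWrap G.length v) (false, none)).1, some u))
             v) u vs := rfl

-- -------- length preservation --------

theorem lenFinish_of (G : List (List Int)) (f : Nat)
    (hf : ∀ st u, (DFSVisitRaw G f st u).length = st.length) :
    ∀ (st : List (Bool × Option Int)) (u : Int) (vs : List Int),
      (finishA G f st u vs).length = st.length := by
  intro st u vs
  unfold finishA
  refine pv_foldl_inv (fun z => z.length = st.length) _ vs st rfl ?_
  intro s v _ hP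
  dsimp only
  split
  · exact hP
  · rw [hf, List.length_set]; exact hP

theorem lenA (G : List (List Int)) :
    ∀ (f : Nat) (st : List (Bool × Option Int)) (u : Int),
      (DFSVisitRaw G f st u).length = st.length := by
  intro f
  induction f with
  | zero => intro st u; rfl
  | succ f ih =>
    intro st u
    rw [visit_succ, lenFinish_of G f ih, List.length_set]

theorem lenFinish (G : List (List Int)) (f : Nat) (st : List (Bool × Option Int)) (u : Int)
    (vs : List Int) : (finishA G f st u vs).length = st.length :=
  lenFinish_of G f (lenA G f) st u vs

-- -------- nvis monotonicity --------

theorem monoFinish_of (G : List (List Int)) (f : Nat)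
    (hf : ∀ st u, nvis (DFSVisitRaw G f st u) ≤ nvis st) :
    ∀ (st : List (Bool × Option Int)) (u : Int) (vs : List Int),
      nvis (finishA G f st u vs) ≤ nvis st := by
  intro st u vs
  unfold finishA
  refine pv_foldl_inv (fun z => nvis z ≤ nvis st) _ vs st le_rfl ?_
  intro s v _ hP
  dsimp only
  split
  · exact hP
  · calc nvis (DFSVisitRaw G f (s.set (pvWrap G.length v)
            ((s.getD (pvWrap G.length v) (false, none)).1, some _)) v)
        ≤ nvis (s.set (pvWrap G.length v)
            ((s.getD (pvWrap G.length v) (false, none)).1, some _)) := hf _ _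
      _ = nvis s := nvis_setPar s _ _
      _ ≤ nvis st := hP

theorem monoA (G : List (List Int)) :
    ∀ (f : Nat) (st : List (Bool × Option Int)) (u : Int),
      nvis (DFSVisitRaw G f st u) ≤ nvis st := by
  intro f
  induction f with
  | zero => intro st u; exact le_rfl
  | succ f ih =>
    intro st u
    rw [visit_succ]
    exact le_trans (monoFinish_of G f ih _ _ _) (nvis_mark_le st (pvWrap G.length u))

theorem monoFinish (G : List (List Int)) (f : Nat) (st : List (Bool × Option Int)) (u : Int)
    (vs : List Int) : nvis (finishA G f st u vs) ≤ nvis st :=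
  monoFinish_of G f (monoA G f) st u vs

-- -------- fuel irrelevance --------

theorem FI (G : List (List Int)) (hG : Pre_DFSRaw G) :
    ∀ (N : Nat) (st : List (Bool × Option Int)) (u : Int) (vs : List Int) (f g : Nat),
      st.length = G.length → (∀ v ∈ vs, -(G.length : Int) ≤ v ∧ v < (G.length : Int)) →
      nvis st ≤ N → nvis st ≤ f → nvis st ≤ g →
      finishA G f st u vs = finishA G g st u vs := by
  intro N
  induction N using Nat.strong_induction_on with
  | _ N ihN =>
    intro st u vs
    induction vs generalizing st with
    | nil => intro f g _ _ _ _ _; rfl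
    | cons v vs ihv =>
      intro f g hlen hvs hN hf hg
      have hv := hvs v (by simp)
      have hw : pvWrap G.length v < G.length := pvWrap_lt _ _ hv.1 hv.2
      have hwst : pvWrap G.length v < st.length := by rw [hlen]; exact hw
      rw [finishA_cons, finishA_cons]
      by_cases hvis : (st.getD (pvWrap G.length v) (false, none)).1
      · rw [if_pos hvis, if_pos hvis]
        exact ihv st f g hlen (fun x hx => hvs x (by simp [hx])) hN hf hg
      · rw [if_neg hvis, if_neg hvis]
        have hb : (st.getD (pvWrap G.length v) (false, none)).1 = false := by
          simpa using hvis
        have h1 : 1 ≤ nvis st := nvis_pos st _ hwst hb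
        obtain ⟨f', rfl⟩ : ∃ f', f = f' + 1 := ⟨f - 1, by omega⟩
        obtain ⟨g', rfl⟩ : ∃ g', g = g' + 1 := ⟨g - 1, by omega⟩
        have hgd : (st.set (pvWrap G.length v)
              ((st.getD (pvWrap G.length v) (false, none)).1, some u)).getD
              (pvWrap G.length v) (false, none)
            = ((st.getD (pvWrap G.length v) (false, none)).1, some u) := by
          rw [List.getD_eq_getElem _ _ (by rw [List.length_set]; exact hwst)]
          exact List.getElem_set_self (by rw [List.length_set]; exact hwst)
        have hmark : (st.set (pvWrap G.length v)
              ((st.getD (pvWrap G.length v) (false, none)).1, some u)).set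
              (pvWrap G.length v)
              (true, ((st.set (pvWrap G.length v)
                ((st.getD (pvWrap G.length v) (false, none)).1, some u)).getD
                (pvWrap G.length v) (false, none)).2)
            = st.set (pvWrap G.length v) (true, some u) := by
          rw [hgd, List.set_set]
        have hnv' : nvis (st.set (pvWrap G.length v) (true, some u)) + 1 = nvis st :=
          nvis_set_true st _ _ hwst hb
        have hlen' : (st.set (pvWrap G.length v) (true, some u)).length = G.length := by
          rw [List.length_set, hlen]
        have hGw : ∀ x ∈ G.getD (pvWrap G.length v) [],
            -(G.length : Int) ≤ x ∧ x < (G.length : Int) := by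
          intro x hx
          have hmem : G.getD (pvWrap G.length v) [] ∈ G := by
            rw [List.getD_eq_getElem _ _ hw]; exact List.getElem_mem hw
          exact hG _ hmem x hx
        have hrec : DFSVisitRaw G (f' + 1)
              (st.set (pvWrap G.length v)
                ((st.getD (pvWrap G.length v) (false, none)).1, some u))
              v
            = DFSVisitRaw G (g' + 1)
              (st.set (pvWrap G.length v)
                ((st.getD (pvWrap G.length v) (false, none)).1, some u))
              v := by
          rw [visit_succ, visit_succ, hmark]
          exact ihN (N - 1) (by omega) _ _ _ f' g' hlen' hGw (by omega) (by omega) (by omega)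
        rw [hrec]
        have hS : nvis (DFSVisitRaw G (g' + 1)
              (st.set (pvWrap G.length v)
                ((st.getD (pvWrap G.length v) (false, none)).1, some u))
              v) + 1 ≤ nvis st := by
          have hm := monoFinish G g' (st.set (pvWrap G.length v) (true, some u))
            v (G.getD (pvWrap G.length v) [])
          rw [visit_succ, hmark]
          omega
        have hlS : (DFSVisitRaw G (g' + 1)
              (st.set (pvWrap G.length v)
                ((st.getD (pvWrap G.length v) (false, none)).1, some u))
              v).length = G.length := by
          rw [lenA, List.length_set, hlen]
        exact ihN (N - 1) (by omega) _ u vs (f' + 1) (g' + 1) hlS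
          (fun x hx => hvs x (by simp [hx])) (by omega) (by omega) (by omega)

-- -------- cost bound for the stack machine --------

def costV (G : List (List Int)) (st : List (Bool × Option Int)) : Nat :=
  ∑ i ∈ Finset.range st.length,
    (if (st.getD i (false, none)).1 then 0 else (G.getD i []).length + 1)

def costS (stack : List (Int × List Int)) : Nat :=
  (stack.map (fun p => p.2.length + 1)).sum

theorem costV_set_true (G : List (List Int)) (st : List (Bool × Option Int)) (w : Nat)
    (x : Option Int) (h : w < st.length) (hb : (st.getD w (false, none)).1 = false) :
    costV G (st.set w (true, x)) + ((G.getD w []).length + 1) = costV G st := by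
  unfold costV
  rw [List.length_set]
  have hw : w ∈ Finset.range st.length := Finset.mem_range.mpr h
  rw [← Finset.add_sum_erase _ _ hw, ← Finset.add_sum_erase _ _ hw]
  have h1 : (st.set w (true, x)).getD w (false, none) = (true, x) := by
    rw [List.getD_eq_getElem _ _ (by rw [List.length_set]; exact h)]
    exact List.getElem_set_self (by rw [List.length_set]; exact h)
  have h2 : ∀ i ∈ (Finset.range st.length).erase w,
      (if ((st.set w (true, x)).getD i (false, none)).1 then 0 else (G.getD i []).length + 1)
        = (if (st.getD i (false, none)).1 then 0 else (G.getD i []).length + 1) := by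
    intro i hi
    have hne : w ≠ i := Ne.symm (Finset.mem_erase.mp hi).1
    rw [List.getD_eq_getElem?_getD, List.getD_eq_getElem?_getD, List.getElem?_set_ne hne,
      List.getD_eq_getElem?_getD]
  rw [Finset.sum_congr rfl h2, h1, hb]
  have e1 : (if ((true : Bool), x).1 = true then (0:Nat) else (G.getD w []).length + 1) = 0 := rfl
  have e2 : (if (false : Bool) = true then (0:Nat) else (G.getD w []).length + 1)
      = (G.getD w []).length + 1 := rfl
  rw [e1, e2]
  omega

theorem pv_sum_getD (G : List (List Int)) :
    ∑ i ∈ Finset.range G.length, ((G.getD i []).length + 1)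
      = (G.map (fun l => l.length + 1)).sum := by
  induction G with
  | nil => simp
  | cons a G ih =>
    rw [List.length_cons, Finset.sum_range_succ']
    simp only [List.getD_cons_succ, List.getD_cons_zero]
    rw [ih, List.map_cons, List.sum_cons]
    omega

theorem costV_le (G : List (List Int)) (st : List (Bool × Option Int))
    (h : st.length = G.length) :
    costV G st ≤ (G.map (fun l => l.length + 1)).sum := by
  unfold costV
  rw [h, ← pv_sum_getD G]
  exact Finset.sum_le_sum (by intro i _; split <;> omega)

-- -------- the bridge: stack machine = A's recursion continuations --------

theorem bridge (G : List (List Int)) (hG : Pre_DFSRaw G) :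
    ∀ (fb : Nat) (st : List (Bool × Option Int)) (stack : List (Int × List Int)),
      st.length = G.length →
      (∀ p ∈ stack, ∀ v ∈ p.2, -(G.length : Int) ≤ v ∧ v < (G.length : Int)) →
      costS stack + costV G st ≤ fb →
      runP G fb st stack = stack.foldl (fun s p => finishA G (nvis s) s p.1 p.2) st := by
  intro fb
  induction fb with
  | zero =>
    intro st stack hlen hstack hcost
    cases stack with
    | nil => rfl
    | cons p rest =>
      exfalso
      unfold costS at hcost
      simp only [List.map_cons, List.sum_cons] at hcost
      omega
  | succ fb ih =>
    intro st stack hlen hstack hcost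
    cases stack with
    | nil => rfl
    | cons p rest =>
      obtain ⟨u, vs⟩ := p
      cases vs with
      | nil =>
        have hstep : runP G (fb+1) st ((u, []) :: rest) = runP G fb st rest := rfl
        rw [hstep, ih st rest hlen (fun q hq => hstack q (by simp [hq]))
          (by unfold costS at hcost ⊢; simp only [List.map_cons, List.sum_cons] at hcost; omega)]
        simp only [List.foldl_cons, finishA_nil]
      | cons v vs =>
        have hv := hstack (u, v :: vs) (by simp) v (by simp)
        have hw : pvWrap G.length v < G.length := pvWrap_lt _ _ hv.1 hv.2
        have hwst : pvWrap G.length v < st.length := by rw [hlen]; exact hw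
        have hstep : runP G (fb+1) st ((u, v :: vs) :: rest)
            = if (st.getD (pvWrap G.length v) (false, none)).1
              then runP G fb st ((u, vs) :: rest)
              else runP G fb (st.set (pvWrap G.length v) (true, some u))
                ((v, G.getD (pvWrap G.length v) []) :: (u, vs) :: rest) := rfl
        by_cases hvis : (st.getD (pvWrap G.length v) (false, none)).1
        · rw [hstep, if_pos hvis]
          rw [ih st ((u, vs) :: rest) hlen
            (by
              intro q hq
              rcases List.mem_cons.mp hq with hq | hq
              · subst hq; exact fun x hx => hstack (u, v :: vs) (by simp) x (by simp [hx])
              · exact hstack q (by simp [hq]))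
            (by unfold costS at hcost ⊢
                simp only [List.map_cons, List.sum_cons, List.length_cons] at hcost ⊢
                omega)]
          simp only [List.foldl_cons, finishA_cons, if_pos hvis]
        · rw [hstep, if_neg hvis]
          have hb : (st.getD (pvWrap G.length v) (false, none)).1 = false := by simpa using hvis
          have hcv := costV_set_true G st (pvWrap G.length v) (some u) hwst hb
          have hGw : ∀ x ∈ G.getD (pvWrap G.length v) [],
              -(G.length : Int) ≤ x ∧ x < (G.length : Int) := by
            intro x hx
            have hmem : G.getD (pvWrap G.length v) [] ∈ G := by
              rw [List.getD_eq_getElem _ _ hw]; exact List.getElem_mem hw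
            exact hG _ hmem x hx
          rw [ih (st.set (pvWrap G.length v) (true, some u))
            ((v, G.getD (pvWrap G.length v) []) :: (u, vs) :: rest)
            (by rw [List.length_set, hlen])
            (by
              intro q hq
              rcases List.mem_cons.mp hq with hq | hq
              · subst hq; exact hGw
              · rcases List.mem_cons.mp hq with hq | hq
                · subst hq; exact fun x hx => hstack (u, v :: vs) (by simp) x (by simp [hx])
                · exact hstack q (by simp [hq]))
            (by
              unfold costS at hcost ⊢
              simp only [List.map_cons, List.sum_cons, List.length_cons] at hcost ⊢
              omega)]
          -- now both sides are foldl's; align the first two frames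
          simp only [List.foldl_cons]
          -- A-side first frame on the original stack
          rw [finishA_cons, if_neg hvis]
          have h1 : 1 ≤ nvis st := nvis_pos st _ hwst hb
          obtain ⟨m, hm⟩ : ∃ m, nvis st = m + 1 := ⟨nvis st - 1, by omega⟩
          have hgd : (st.set (pvWrap G.length v)
                ((st.getD (pvWrap G.length v) (false, none)).1, some u)).getD
                (pvWrap G.length v) (false, none)
              = ((st.getD (pvWrap G.length v) (false, none)).1, some u) := by
            rw [List.getD_eq_getElem _ _ (by rw [List.length_set]; exact hwst)]
            exact List.getElem_set_self (by rw [List.length_set]; exact hwst)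
          have hmark : (st.set (pvWrap G.length v)
                ((st.getD (pvWrap G.length v) (false, none)).1, some u)).set
                (pvWrap G.length v)
                (true, ((st.set (pvWrap G.length v)
                  ((st.getD (pvWrap G.length v) (false, none)).1, some u)).getD
                  (pvWrap G.length v) (false, none)).2)
              = st.set (pvWrap G.length v) (true, some u) := by
            rw [hgd, List.set_set]
          have hnv' : nvis (st.set (pvWrap G.length v) (true, some u)) + 1 = nvis st :=
            nvis_set_true st _ _ hwst hb
          have hS : DFSVisitRaw G (nvis st)
                (st.set (pvWrap G.length v)
                  ((st.getD (pvWrap G.length v) (false, none)).1, some u))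
                v
              = finishA G (nvis (st.set (pvWrap G.length v) (true, some u)))
                  (st.set (pvWrap G.length v) (true, some u))
                  v (G.getD (pvWrap G.length v) []) := by
            rw [hm, visit_succ, hmark]
            congr 1
            omega
          rw [hS]
          -- the second frame: fuels nvis st vs nvis S agree by FI
          have hlS : (finishA G (nvis (st.set (pvWrap G.length v) (true, some u)))
                (st.set (pvWrap G.length v) (true, some u))
                v (G.getD (pvWrap G.length v) [])).length = G.length := by
            rw [lenFinish, List.length_set, hlen]
          have hnvS : nvis (finishA G (nvis (st.set (pvWrap G.length v) (true, some u)))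
                (st.set (pvWrap G.length v) (true, some u))
                v (G.getD (pvWrap G.length v) []))
              ≤ nvis (st.set (pvWrap G.length v) (true, some u)) := monoFinish G _ _ _ _
          rw [FI G hG (nvis st) _ u vs (nvis _) (nvis st) hlS
            (fun x hx => hstack (u, v :: vs) (by simp) x (by simp [hx]))
            (by omega) le_rfl (by omega)]

-- -------- B's two parallel lists are the pair-state machine --------

theorem glue (G : List (List Int)) :
    ∀ (f : Nat) (st : List (Bool × Option Int)) (stack : List (Int × List Int)),
      pvRunB G f (st.map (fun p => p.1), st.map (fun p => p.2)) stack
        = ((runP G f st stack).map (fun p => p.1), (runP G f st stack).map (fun p => p.2)) := by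
  intro f
  induction f with
  | zero => intro st stack; rfl
  | succ f ih =>
    intro st stack
    cases stack with
    | nil => rfl
    | cons p rest =>
      obtain ⟨u, vs⟩ := p
      cases vs with
      | nil => exact ih st rest
      | cons v vs =>
        have hcond : (st.map (fun p => p.1)).getD (pvWrap G.length v) false
            = (st.getD (pvWrap G.length v) (false, none)).1 := pv_getD_map_fst st _
        have hstepB : pvRunB G (f+1) (st.map (fun p => p.1), st.map (fun p => p.2))
              ((u, v :: vs) :: rest)
            = if (st.map (fun p => p.1)).getD (pvWrap G.length v) false
              then pvRunB G f (st.map (fun p => p.1), st.map (fun p => p.2)) ((u, vs) :: rest)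
              else pvRunB G f ((st.map (fun p => p.1)).set (pvWrap G.length v) true,
                  (st.map (fun p => p.2)).set (pvWrap G.length v) (some u))
                ((v, G.getD (pvWrap G.length v) []) :: (u, vs) :: rest) := rfl
        have hstepP : runP G (f+1) st ((u, v :: vs) :: rest)
            = if (st.getD (pvWrap G.length v) (false, none)).1
              then runP G f st ((u, vs) :: rest)
              else runP G f (st.set (pvWrap G.length v) (true, some u))
                ((v, G.getD (pvWrap G.length v) []) :: (u, vs) :: rest) := rfl
        rw [hstepB, hstepP, hcond]
        by_cases h : (st.getD (pvWrap G.length v) (false, none)).1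
        · rw [if_pos h, if_pos h]
          exact ih st ((u, vs) :: rest)
        · rw [if_neg h, if_neg h]
          have e1 : (st.map (fun p => p.1)).set (pvWrap G.length v) true
              = (st.set (pvWrap G.length v) (true, some u)).map (fun p => p.1) := by
            rw [List.map_set]
          have e2 : (st.map (fun p => p.2)).set (pvWrap G.length v) (some u)
              = (st.set (pvWrap G.length v) (true, some u)).map (fun p => p.2) := by
            rw [List.map_set]
          rw [e1, e2]
          exact ih (st.set (pvWrap G.length v) (true, some u)) _

-- -------- final assembly --------

theorem pvWrap_coe (n a : Nat) : pvWrap n ((a : Nat) : Int) = a := by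
  unfold pvWrap; split_ifs with h <;> omega

theorem main_eq (G : List (List Int)) (hG : Pre_DFSRaw G) : DFSRaw G = DFSRaw_alt G := by
  show ((List.range G.length).foldl
      (fun vs v => if (vs.getD v (false, none)).1 then vs else DFSVisitRaw G G.length vs (v : Int))
      (List.replicate G.length ((false : Bool), (none : Option Int)))).map (fun p => p.2)
    = ((List.range G.length).foldl
      (fun (st : List Bool × List (Option Int)) s =>
        if st.1.getD s false then st
        else pvRunB G (2 * ((G.map (fun l => l.length + 1)).sum) + 1) (st.1.set s true, st.2)
          [((s : Int), G.getD s [])])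
      (List.replicate G.length false, List.replicate G.length (none : Option Int))).2
  have main := pv_foldl_rel
    (fun (s : List (Bool × Option Int)) (t : List Bool × List (Option Int)) =>
      t.1 = s.map (fun p => p.1) ∧ t.2 = s.map (fun p => p.2) ∧ s.length = G.length)
    (fun vs v => if (vs.getD v (false, none)).1 then vs else DFSVisitRaw G G.length vs (v : Int))
    (fun (st : List Bool × List (Option Int)) s =>
      if st.1.getD s false then st
      else pvRunB G (2 * ((G.map (fun l => l.length + 1)).sum) + 1) (st.1.set s true, st.2)
        [((s : Int), G.getD s [])])
    (List.range G.length)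
    (List.replicate G.length ((false : Bool), (none : Option Int)))
    (List.replicate G.length false, List.replicate G.length (none : Option Int))
    (by refine ⟨?_, ?_, ?_⟩ <;> simp [List.map_replicate])
    ?step
  · exact main.2.1.symm
  case step =>
    intro s t a ha hR
    obtain ⟨ht1, ht2, hlen⟩ := hR
    dsimp only
    have han : a < G.length := List.mem_range.mp ha
    have hcond : t.1.getD a false = (s.getD a (false, none)).1 := by
      rw [ht1]; exact pv_getD_map_fst s a
    by_cases h : (s.getD a (false, none)).1
    · rw [hcond, if_pos h, if_pos h]
      exact ⟨ht1, ht2, hlen⟩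
    · rw [hcond, if_neg h, if_neg h]
      have hb : (s.getD a (false, none)).1 = false := by simpa using h
      have has : a < s.length := by rw [hlen]; exact han
      have e1 : t.1.set a true
          = (s.set a (true, (s.getD a (false, none)).2)).map (fun p => p.1) := by
        rw [ht1, List.map_set]
      have e2 : t.2 = (s.set a (true, (s.getD a (false, none)).2)).map (fun p => p.2) := by
        rw [ht2, List.map_set]
        have hx : (s.map (fun p => p.2)).getD a none = (s.getD a (false, none)).2 :=
          pv_getD_map_snd s a
        show s.map (fun p => p.2) = (s.map (fun p => p.2)).set a ((s.getD a (false, none)).2)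
        rw [← hx]
        exact (pv_set_getD_self (s.map (fun p => p.2)) a none
          (by rw [List.length_map]; exact has)).symm
      rw [e1, e2, glue G _ (s.set a (true, (s.getD a (false, none)).2)) [((a : Int), G.getD a [])]]
      have hlmk : (s.set a (true, (s.getD a (false, none)).2)).length = G.length := by
        rw [List.length_set, hlen]
      have hbr := bridge G hG (2 * ((G.map (fun l => l.length + 1)).sum) + 1)
        (s.set a (true, (s.getD a (false, none)).2)) [((a : Int), G.getD a [])] hlmk
        (by
          intro q hq x hx
          have hq' : q = ((a : Int), G.getD a []) := by simpa using hq
          subst hq'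
          have hmem : G.getD a [] ∈ G := by
            rw [List.getD_eq_getElem _ _ han]; exact List.getElem_mem han
          exact hG _ hmem x hx)
        (by
          unfold costS
          simp only [List.map_cons, List.map_nil, List.sum_cons, List.sum_nil]
          have hc1 := costV_le G (s.set a (true, (s.getD a (false, none)).2)) hlmk
          have hc2 : (G.getD a []).length + 1 ≤ (G.map (fun l => l.length + 1)).sum := by
            apply List.le_sum_of_mem
            rw [List.getD_eq_getElem _ _ han]
            exact List.mem_map.mpr ⟨G[a], List.getElem_mem han, rfl⟩
          omega)
      rw [hbr]
      simp only [List.foldl_cons, List.foldl_nil]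
      have h1 : 1 ≤ nvis s := nvis_pos s a has hb
      have hnvmk : nvis (s.set a (true, (s.getD a (false, none)).2)) + 1 = nvis s :=
        nvis_set_true s a _ has hb
      have hns : nvis s ≤ G.length := by
        have := nvis_le_length s
        omega
      obtain ⟨m, hm⟩ : ∃ m, G.length = m + 1 := ⟨G.length - 1, by omega⟩
      have hA : DFSVisitRaw G G.length s (a : Int)
          = finishA G (nvis (s.set a (true, (s.getD a (false, none)).2)))
              (s.set a (true, (s.getD a (false, none)).2)) (a : Int) (G.getD a []) := by
        rw [hm, visit_succ, pvWrap_coe]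
        exact FI G hG (nvis s) _ (a : Int) (G.getD a []) m
          (nvis (s.set a (true, (s.getD a (false, none)).2))) hlmk
          (by
            intro x hx
            have hmem : G.getD a [] ∈ G := by
              rw [List.getD_eq_getElem _ _ han]; exact List.getElem_mem han
            exact hG _ hmem x hx)
          (by omega) (by omega) le_rfl
      rw [hA]
      refine ⟨rfl, rfl, ?_⟩
      rw [lenFinish, List.length_set, hlen]

-- ===== VERDICT (by name: the statement is the Claim_ definition above) =====
theorem DFSRaw_spec : Claim_equal_DFSRaw := by
  intro G _ hG
  exact main_eq G hG
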